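-- pv_equiv track=rewrite | github.com/Voldek404/High-school-of-programming | py_8tasks/8z_task5.py | massdriver_helper
-- ===== SOURCE A (Python) =====
-- def massdriver_helper(activate: list, index: int, activate_dict) -> int:
--     if index == len(activate):
--         return -1
--     item = activate[index]
--     if item in activate_dict.keys():
--         activate_dict[activate[index]] = activate_dict.get(item, 0) + 1
--         if activate_dict[item] > 1:
--             return activate.index(item)
--     return massdriver_helper(activate, index + 1, activate_dict)
-- ===== SOURCE B (Python) =====
-- def massdriver_helper(activate: list, index: int, activate_dict) -> int:
--     # Pure delta-counting rewrite: instead of mutating activate_dict along the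
--     # scan, keep a separate tally of how many scanned items hit each key and
--     # test original_count + scanned >= 1.  (Return value only: unlike A, this
--     # does not mutate activate_dict.)
--     seen = {}
--     for j in range(index, len(activate)):
--         item = activate[j]
--         if item in activate_dict:
--             if activate_dict[item] + seen.get(item, 0) >= 1:
--                 return activate.index(item)
--             seen[item] = seen.get(item, 0) + 1
--     return -1
-- ===== Notes on version B (the rewrite author's own statement) =====
-- stated objective: alternative
-- what changed: B replaces A's mutate-the-dict tail recursion by a pure single for-loop: it never writes to activate_dict, instead keeping a separate 'seen' tally of scanned hits and testing original_count + seen >= 1 (return value only: B does not mutate activate_dict, A does).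
import Mathlib
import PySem

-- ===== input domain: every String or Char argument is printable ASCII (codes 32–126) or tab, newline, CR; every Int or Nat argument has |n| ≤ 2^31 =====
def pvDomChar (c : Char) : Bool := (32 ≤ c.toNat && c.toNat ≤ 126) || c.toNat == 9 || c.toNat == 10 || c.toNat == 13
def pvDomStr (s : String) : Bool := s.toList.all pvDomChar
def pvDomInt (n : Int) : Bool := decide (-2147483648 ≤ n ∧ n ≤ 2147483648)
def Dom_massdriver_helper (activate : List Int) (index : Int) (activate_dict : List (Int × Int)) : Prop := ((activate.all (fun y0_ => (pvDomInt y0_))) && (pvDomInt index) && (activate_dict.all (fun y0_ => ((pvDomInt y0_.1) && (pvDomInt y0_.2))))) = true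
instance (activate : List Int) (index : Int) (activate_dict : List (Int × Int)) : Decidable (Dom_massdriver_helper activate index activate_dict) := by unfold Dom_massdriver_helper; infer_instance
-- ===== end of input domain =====

-- B replaces A's mutate-and-rescan recursion by a pure delta-count scan (original dict untouched,
-- a separate 'seen' tally); equivalence is about the RETURN value only — A mutates activate_dict, B does not.


-- ===== PORT A =====
-- literal transliteration of A's tail recursion; the Python dict is the association list, wrapped in
-- PySem.Dict for each operation; the recursive call receives the updated items. The Nat fuel is only a
-- totality guard: the wrapper supplies one unit more than the number of remaining recursion steps, so
-- the 0-fuel branch is never reached inside Pre_.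
def massdriverHelperGo (activate : List Int) (fuel : Nat) (index : Int) (activate_dict : List (Int × Int)) : Int :=
  match fuel with
  | 0 => 0  -- unreachable: the wrapper's fuel exceeds the number of recursion steps
  | fuel + 1 =>
    if index = (activate.length : Int) then -1
    else
      match PySem.List.pyGet? activate index with
      | none => 0  -- Python raises IndexError here; excluded by Pre_
      | some item =>
        if item ∈ (PySem.Dict.mk activate_dict).keys then
          -- activate_dict[activate[index]] = activate_dict.get(item, 0) + 1
          let d' := (PySem.Dict.mk activate_dict).insert item
                      ((PySem.Dict.mk activate_dict).getD item 0 + 1)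
          if d'.getD item 0 > 1 then
            -- activate.index(item): item = activate[index] is in activate, so index? is some
            match PySem.List.index? activate item with
            | some k => (k : Int)
            | none => 0
          else massdriverHelperGo activate fuel (index + 1) d'.items
        else massdriverHelperGo activate fuel (index + 1) activate_dict

def massdriver_helper (activate : List Int) (index : Int) (activate_dict : List (Int × Int)) : Int :=
  massdriverHelperGo activate (((activate.length : Int) - index).toNat + 1) index activate_dict

-- ===== PORT B =====
-- B's for-loop over range(index, len(activate)) with a fresh 'seen' tally dict; the original dict d0
-- is only read. Structural recursion on the position list (no fuel needed).
def massAltGo (activate : List Int) (d0 : PySem.Dict Int Int) :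
    List Int → PySem.Dict Int Int → Int
  | [], _ => -1
  | j :: rest, seen =>
    match PySem.List.pyGet? activate j with
    | none => 0  -- IndexError; excluded by Pre_
    | some item =>
      if d0.contains item then
        if d0.getD item 0 + seen.getD item 0 ≥ 1 then
          match PySem.List.index? activate item with
          | some k => (k : Int)
          | none => 0
        else massAltGo activate d0 rest (seen.insert item (seen.getD item 0 + 1))
      else massAltGo activate d0 rest seen

def massdriver_helper_alt (activate : List Int) (index : Int) (activate_dict : List (Int × Int)) : Int :=
  massAltGo activate (PySem.Dict.mk activate_dict)
    (PySem.List.pyRange index (activate.length : Int) 1) PySem.Dict.empty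

-- ===== PRECONDITION & SPEC =====
-- Pre_: exactly where Python A returns (A raises IndexError when index < -len or index > len;
-- index = len is A's base case).
def Pre_massdriver_helper (activate : List Int) (index : Int) (activate_dict : List (Int × Int)) : Prop :=
  -(activate.length : Int) ≤ index ∧ index ≤ (activate.length : Int)
instance (activate : List Int) (index : Int) (activate_dict : List (Int × Int)) : Decidable (Pre_massdriver_helper activate index activate_dict) := by unfold Pre_massdriver_helper; infer_instance

def pvWitness_massdriver_helper : List Int × Int × (List (Int × Int)) := ([2, 1, 2, 3], 0, [(2, 0), (3, 5)])

def Spec_massdriver_helper (activate : List Int) (index : Int) (activate_dict : List (Int × Int)) (out : Int) : Prop := out = massdriver_helper_alt activate index activate_dict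
instance (activate : List Int) (index : Int) (activate_dict : List (Int × Int)) (out : Int) : Decidable (Spec_massdriver_helper activate index activate_dict out) := by unfold Spec_massdriver_helper; infer_instance

-- ===== CLAIM (what is proved, stated in full; the proofs are below) =====
def Claim_equal_massdriver_helper : Prop := ∀ (activate : List Int) (index : Int) (activate_dict : List (Int × Int)), Dom_massdriver_helper activate index activate_dict → Pre_massdriver_helper activate index activate_dict → Spec_massdriver_helper activate index activate_dict (massdriver_helper activate index activate_dict)

-- ===== LEMMAS AND PROOFS =====

-- Main invariant: A's mutated dict d always satisfies d = d0 + seen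
-- (same key set; the value at every key of d0 is d0's value plus the scanned tally).
theorem massdriverGo_eq_altGo (activate : List Int) (d0 : PySem.Dict Int Int) :
    ∀ (fuel : Nat) (index : Int) (d seen : PySem.Dict Int Int),
      index ≤ (activate.length : Int) →
      ((activate.length : Int) - index).toNat < fuel →
      (∀ x, d.contains x = d0.contains x) →
      (∀ x, d0.contains x = true → d.getD x 0 = d0.getD x 0 + seen.getD x 0) →
      massdriverHelperGo activate fuel index d.items
        = massAltGo activate d0 (PySem.List.pyRange index (activate.length : Int) 1) seen := by
  intro fuel
  induction fuel with
  | zero => intro index d seen _ hf _ _; omega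
  | succ fuel ih =>
    intro index d seen hle hf hcont hval
    rw [massdriverHelperGo]
    by_cases hlen : index = (activate.length : Int)
    · rw [if_pos hlen, PySem.List.pyRange_one_eq_nil (by omega)]
      rfl
    · have hlt : index < (activate.length : Int) := lt_of_le_of_ne hle hlen
      rw [if_neg hlen, PySem.List.pyRange_one_cons hlt, massAltGo]
      split
      next => rfl
      next item hg =>
        have hmem : item ∈ (PySem.Dict.mk d.items).keys ↔ d.contains item := by
          rw [PySem.Dict.contains_iff_mem_keys]
        by_cases hc : d0.contains item
        · have hdc : d.contains item := by rw [hcont]; exact hc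
          rw [if_pos (hmem.mpr hdc), if_pos hc]
          have hins : (PySem.Dict.mk d.items).insert item ((PySem.Dict.mk d.items).getD item 0 + 1)
              = d.insert item (d.getD item 0 + 1) := rfl
          rw [hins]
          show (if (d.insert item (d.getD item 0 + 1)).getD item 0 > 1 then
              match PySem.List.index? activate item with
              | some k => (k : Int)
              | none => 0
            else massdriverHelperGo activate fuel (index + 1)
                   (d.insert item (d.getD item 0 + 1)).items) = _
          have hsel : (d.insert item (d.getD item 0 + 1)).getD item 0 = d.getD item 0 + 1 :=
            PySem.Dict.getD_insert_self d item (d.getD item 0 + 1) 0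
          rw [hsel]
          have heq : d.getD item 0 = d0.getD item 0 + seen.getD item 0 := hval item hc
          by_cases hgt : d0.getD item 0 + seen.getD item 0 ≥ 1
          · rw [if_pos (by omega : d.getD item 0 + 1 > 1), if_pos hgt]
          · rw [if_neg (by omega : ¬ d.getD item 0 + 1 > 1), if_neg hgt]
            apply ih (index + 1) (d.insert item (d.getD item 0 + 1))
                     (seen.insert item (seen.getD item 0 + 1)) (by omega) (by omega)
            · intro x
              rw [PySem.Dict.contains_insert]
              by_cases hx : x = item
              · simp [hx, hc]
              · simp [hx, hcont x]
            · intro x hx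
              by_cases hxi : x = item
              · subst hxi
                rw [PySem.Dict.getD_insert_self, PySem.Dict.getD_insert_self]
                omega
              · rw [PySem.Dict.getD_insert_of_ne _ _ _ hxi,
                    PySem.Dict.getD_insert_of_ne _ _ _ hxi]
                exact hval x hx
        · have hdc : ¬ d.contains item := by rw [hcont]; exact fun h => hc (by simpa using h)
          rw [if_neg (fun hm => hdc (hmem.mp hm)), if_neg (by simpa using hc)]
          exact ih (index + 1) d seen (by omega) (by omega) hcont hval

-- ===== VERDICT (by name: the statement is the Claim_ definition above) =====
theorem massdriver_helper_spec : Claim_equal_massdriver_helper := by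
  intro activate index activate_dict _ hpre
  unfold Spec_massdriver_helper massdriver_helper massdriver_helper_alt
  exact massdriverGo_eq_altGo activate (PySem.Dict.mk activate_dict)
    (((activate.length : Int) - index).toNat + 1) index (PySem.Dict.mk activate_dict)
    PySem.Dict.empty hpre.2 (by omega) (fun _ => rfl)
    (fun x _ => by rw [PySem.Dict.getD_empty]; omega)
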